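-- pv_equiv track=rewrite | github.com/jordiw98/pool-cli | pool/phases/classifier.py | _score_ocr_for_pools
-- ===== SOURCE A (Python) =====
-- def _score_ocr_for_pools(
--     ocr_text: str,
--     pool_keywords: dict[str, list[str]],
-- ) -> list[tuple[str, int, set[str]]]:
--     """Score OCR text against each pool's keyword bank.
--
--     Returns a sorted list of (pool_id, match_count, matched_keywords)
--     in descending order of match_count.
--     """
--     text_lower = ocr_text.lower()
--     scores: list[tuple[str, int, set[str]]] = []
--
--     for pid, keywords in pool_keywords.items():
--         matched: set[str] = set()
--         for kw in keywords:
--             if kw in text_lower: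
--                 matched.add(kw)
--         if matched:
--             scores.append((pid, len(matched), matched))
--
--     scores.sort(key=lambda x: x[1], reverse=True)
--     return scores
-- ===== SOURCE B (Python) =====
-- def _score_ocr_for_pools(
--     ocr_text: str,
--     pool_keywords: dict[str, list[str]],
-- ) -> list[tuple[str, int, set[str]]]:
--     """Alternative: comprehension pipeline — dedup each bank, one substring test
--     per distinct keyword, then order by emitting entries per distinct match-count
--     in descending order instead of a comparison sort."""
--     text = ocr_text.lower()
--     entries = [(pid, len(hits), set(hits))
--                for pid, kws in pool_keywords.items()
--                for hits in [[kw for kw in dict.fromkeys(kws) if kw in text]]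
--                if hits]
--     counts = sorted({n for _, n, _ in entries}, reverse=True)
--     return [e for c in counts for e in entries if e[1] == c]
-- ===== Notes on version B (the rewrite author's own statement) =====
-- stated objective: alternative
-- what changed: B replaces A's accumulator loop with set upkeep per keyword occurrence by a comprehension pipeline (dedup each bank once, one substring test per distinct keyword, filter-map to entries), and replaces A's comparison sort by emitting entries per distinct match-count in descending order (selection by count).
import Mathlib
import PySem

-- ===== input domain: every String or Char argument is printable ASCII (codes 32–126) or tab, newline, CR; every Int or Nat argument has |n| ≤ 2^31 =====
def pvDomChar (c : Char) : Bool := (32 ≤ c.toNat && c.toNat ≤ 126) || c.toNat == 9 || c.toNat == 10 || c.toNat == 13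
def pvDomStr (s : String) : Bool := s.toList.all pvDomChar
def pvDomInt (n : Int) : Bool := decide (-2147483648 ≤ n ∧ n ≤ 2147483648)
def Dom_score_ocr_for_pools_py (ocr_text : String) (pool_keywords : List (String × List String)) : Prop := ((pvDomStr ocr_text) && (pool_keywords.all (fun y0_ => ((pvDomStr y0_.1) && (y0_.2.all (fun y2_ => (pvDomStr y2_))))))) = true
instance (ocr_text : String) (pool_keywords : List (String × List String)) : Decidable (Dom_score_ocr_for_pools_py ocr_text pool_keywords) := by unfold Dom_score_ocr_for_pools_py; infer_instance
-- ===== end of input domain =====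

-- B replaces A's accumulator loop with per-occurrence set upkeep by a filter-map
-- pipeline over deduped banks, and A's comparison sort by emitting entries per
-- distinct match-count in descending order (objective: alternative).

-- ===== PORT A =====
def score_ocr_for_pools_py (ocr_text : String) (pool_keywords : List (String × List String)) : List (String × Int × List String) :=
  let text_lower := PySem.Str.lower ocr_text
  let scores : List (String × Int × List String) :=
    (PySem.Dict.ofList pool_keywords).items.foldl (fun scores pk =>
      let matched : PySem.Set String :=
        pk.2.foldl (fun m kw => if PySem.Str.isIn kw text_lower then PySem.Set.add m kw else m) PySem.Set.empty
      if matched = [] then scores else scores ++ [(pk.1, (matched.length : Int), matched)]) []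
  PySem.List.sorted scores (fun x => x.2.1) true

-- ===== PORT B =====
def score_ocr_for_pools_py_alt (ocr_text : String) (pool_keywords : List (String × List String)) : List (String × Int × List String) :=
  let text := PySem.Str.lower ocr_text
  let entries : List (String × Int × List String) :=
    (PySem.Dict.ofList pool_keywords).items.filterMap (fun pk =>
      match (PySem.List.dedup pk.2).filter (fun kw => PySem.Str.isIn kw text) with
      | [] => none
      | hits => some (pk.1, (hits.length : Int), PySem.Set.ofList hits))
  let counts := PySem.List.sorted (PySem.Set.ofList (entries.map (fun e => e.2.1))) (fun c => c) true
  counts.flatMap (fun c => entries.filter (fun e => e.2.1 == c))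

-- ===== PRECONDITION & SPEC =====
def Spec_score_ocr_for_pools_py (ocr_text : String) (pool_keywords : List (String × List String)) (out : List (String × Int × List String)) : Prop := out = score_ocr_for_pools_py_alt ocr_text pool_keywords
instance (ocr_text : String) (pool_keywords : List (String × List String)) (out : List (String × Int × List String)) : Decidable (Spec_score_ocr_for_pools_py ocr_text pool_keywords out) := by unfold Spec_score_ocr_for_pools_py; infer_instance

-- ===== CLAIM (what is proved, stated in full; the proofs are below) =====
def Claim_equal_score_ocr_for_pools_py : Prop := ∀ (ocr_text : String) (pool_keywords : List (String × List String)), Dom_score_ocr_for_pools_py ocr_text pool_keywords → Spec_score_ocr_for_pools_py ocr_text pool_keywords (score_ocr_for_pools_py ocr_text pool_keywords)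

-- ===== LEMMAS AND PROOFS =====

-- Set.add under a known contains value
theorem pv_add_of_contains {α : Type} [BEq α] (s : PySem.Set α) (x : α)
    (h : s.contains x = true) : PySem.Set.add s x = s := by
  unfold PySem.Set.add; rw [h]; simp

theorem pv_add_of_not_contains {α : Type} [BEq α] (s : PySem.Set α) (x : α)
    (h : s.contains x = false) : PySem.Set.add s x = s ++ [x] := by
  unfold PySem.Set.add; rw [h]; simp

-- insertBy passes over a prefix it is not inserted before
theorem pv_insertBy_pass {α : Type} (b : α → α → Bool) (x : α) (l r : List α)
    (h : ∀ y ∈ l, b x y = false) :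
    PySem.List.insertBy b x (l ++ r) = l ++ PySem.List.insertBy b x r := by
  induction l with
  | nil => simp
  | cons y l ih =>
    rw [List.cons_append, PySem.List.insertBy, h y (by simp)]
    simp only [Bool.false_eq_true, if_false, List.cons_append]
    rw [ih (fun z hz => h z (by simp [hz]))]

-- insertBy goes to the front when it precedes everything
theorem pv_insertBy_front {α : Type} (b : α → α → Bool) (x : α) (l : List α)
    (h : ∀ y ∈ l, b x y = true) :
    PySem.List.insertBy b x l = x :: l := by
  cases l with
  | nil => rw [PySem.List.insertBy]
  | cons y l => rw [PySem.List.insertBy, h y (by simp)]; simp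

theorem pv_insertBy_perm {α : Type} (b : α → α → Bool) (x : α) (l : List α) :
    (PySem.List.insertBy b x l).Perm (x :: l) := by
  induction l with
  | nil => rw [PySem.List.insertBy]
  | cons y l ih =>
    rw [PySem.List.insertBy]
    by_cases hb : b x y = true
    · simp [hb]
    · simp only [Bool.not_eq_true] at hb
      simp only [hb, Bool.false_eq_true, if_false]
      exact (ih.cons y).trans (List.Perm.swap x y l)

-- descending insertion keeps a strictly descending list strictly descending
theorem pv_descInsert_pairwise (c : Int) (l : List Int)
    (hp : l.Pairwise (fun a b => b < a)) (hne : ∀ y ∈ l, y ≠ c) :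
    (PySem.List.insertBy (fun a b => decide (b < a)) c l).Pairwise (fun a b => b < a) := by
  induction l with
  | nil => rw [PySem.List.insertBy]; simp
  | cons y l ih =>
    rw [List.pairwise_cons] at hp
    rw [PySem.List.insertBy]
    by_cases hlt : y < c
    · simp only [hlt, decide_true, if_true]
      refine List.pairwise_cons.mpr ⟨?_, List.pairwise_cons.mpr ⟨hp.1, hp.2⟩⟩
      intro z hz
      rcases List.mem_cons.mp hz with h | h
      · exact h ▸ hlt
      · exact lt_trans (hp.1 z h) hlt
    · simp only [hlt, decide_false, Bool.false_eq_true, if_false]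
      have hcy : c < y := lt_of_le_of_ne (not_lt.mp hlt) (Ne.symm (hne y (by simp)))
      refine List.pairwise_cons.mpr ⟨?_, ih hp.2 (fun z hz => hne z (by simp [hz]))⟩
      intro z hz
      rcases (PySem.List.mem_insertBy _ _ _ _).mp hz with h | h
      · exact h ▸ hcy
      · exact hp.1 z h

-- inserting an element whose key already occurs: it lands at the end of its group
theorem pv_group_mem {α : Type} (k : α → Int) (x : α) (q : List α) :
    ∀ (cs : List Int), cs.Pairwise (fun a b => b < a) → k x ∈ cs →
    PySem.List.insertBy (fun a b => decide (k b < k a)) x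
        (cs.flatMap (fun c => q.filter (fun e => k e == c)))
      = cs.flatMap (fun c => q.filter (fun e => k e == c) ++ if k x == c then [x] else []) := by
  intro cs
  induction cs with
  | nil => intro _ h; simp at h
  | cons c cs ih =>
    intro hp hmem
    rw [List.pairwise_cons] at hp
    by_cases hxc : k x = c
    · have hpass : ∀ y ∈ q.filter (fun e => k e == c), (decide (k y < k x)) = false := by
        intro y hy
        have : k y = c := by simpa using (List.mem_filter.mp hy).2
        simp [this, hxc]
      have hfront : ∀ y ∈ cs.flatMap (fun c' => q.filter (fun e => k e == c')), (decide (k y < k x)) = true := by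
        intro y hy
        rcases List.mem_flatMap.mp hy with ⟨c', hc', hy'⟩
        have hkey : k y = c' := by simpa using (List.mem_filter.mp hy').2
        have : c' < c := hp.1 c' hc'
        simp [hkey, hxc, this]
      rw [List.flatMap_cons, pv_insertBy_pass _ _ _ _ hpass,
        pv_insertBy_front _ _ _ hfront, List.flatMap_cons]
      have hrest : cs.flatMap (fun c' => q.filter (fun e => k e == c') ++ if k x == c' then [x] else [])
          = cs.flatMap (fun c' => q.filter (fun e => k e == c')) := by
        apply List.flatMap_congr
        intro c' hc'
        have : k x ≠ c' := by
          have := hp.1 c' hc'; omega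
        simp [this]
      rw [hrest]
      simp [hxc]
    · have hmem' : k x ∈ cs := by
        rcases List.mem_cons.mp hmem with h | h
        · exact absurd h hxc
        · exact h
      have hxlt : k x < c := hp.1 _ hmem'
      have hpass : ∀ y ∈ q.filter (fun e => k e == c), (decide (k y < k x)) = false := by
        intro y hy
        have : k y = c := by simpa using (List.mem_filter.mp hy).2
        simp [this]; omega
      rw [List.flatMap_cons, pv_insertBy_pass _ _ _ _ hpass, ih hp.2 hmem',
        List.flatMap_cons]
      have : (k x == c) = false := by simp [hxc]
      simp [this]

-- inserting an element with a fresh key: a new singleton group appears in key position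
theorem pv_group_new {α : Type} (k : α → Int) (x : α) (q : List α)
    (hq : ∀ e ∈ q, (k e == k x) = false) :
    ∀ (cs : List Int), cs.Pairwise (fun a b => b < a) → k x ∉ cs →
    PySem.List.insertBy (fun a b => decide (k b < k a)) x
        (cs.flatMap (fun c => q.filter (fun e => k e == c)))
      = (PySem.List.insertBy (fun a b => decide (b < a)) (k x) cs).flatMap
          (fun c => q.filter (fun e => k e == c) ++ if k x == c then [x] else []) := by
  intro cs
  induction cs with
  | nil =>
    intro _ _
    rw [List.flatMap_nil, PySem.List.insertBy, PySem.List.insertBy, List.flatMap_cons]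
    have : q.filter (fun e => k e == k x) = [] := List.filter_eq_nil_iff.mpr (by
      intro e he; simp [hq e he])
    simp [this]
  | cons c cs ih =>
    intro hp hnot
    rw [List.pairwise_cons] at hp
    have hxc : k x ≠ c := by intro h; exact hnot (by simp [h])
    by_cases hlt : c < k x
    · rw [PySem.List.insertBy]
      simp only [hlt, decide_true, if_true]
      have hfront : ∀ y ∈ (c :: cs).flatMap (fun c' => q.filter (fun e => k e == c')), (decide (k y < k x)) = true := by
        intro y hy
        rcases List.mem_flatMap.mp hy with ⟨c', hc', hy'⟩
        have hkey : k y = c' := by simpa using (List.mem_filter.mp hy').2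
        rcases List.mem_cons.mp hc' with h | h
        · simp [hkey, h, hlt]
        · have : c' < c := hp.1 c' h
          simp [hkey]; omega
      rw [pv_insertBy_front _ _ _ hfront]
      have hfx : q.filter (fun e => k e == k x) = [] := List.filter_eq_nil_iff.mpr (by
        intro e he; simp [hq e he])
      have hrest : (c :: cs).flatMap (fun c' => q.filter (fun e => k e == c') ++ if k x == c' then [x] else [])
          = (c :: cs).flatMap (fun c' => q.filter (fun e => k e == c')) := by
        apply List.flatMap_congr
        intro c' hc'
        have : k x ≠ c' := by intro h; exact hnot (h ▸ hc')
        simp [this]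
      conv_rhs => rw [List.flatMap_cons, hrest]
      simp [hfx]
    · have hxlt : k x < c := lt_of_le_of_ne (not_lt.mp hlt) hxc
      have hpass : ∀ y ∈ q.filter (fun e => k e == c), (decide (k y < k x)) = false := by
        intro y hy
        have : k y = c := by simpa using (List.mem_filter.mp hy).2
        simp [this]; omega
      have hnot' : k x ∉ cs := fun h => hnot (by simp [h])
      rw [List.flatMap_cons, pv_insertBy_pass _ _ _ _ hpass, ih hp.2 hnot']
      conv_rhs => rw [PySem.List.insertBy]
      simp only [hlt, decide_false, Bool.false_eq_true, if_false]
      rw [List.flatMap_cons]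
      have : (k x == c) = false := by simp [hxc]
      simp [this]

-- the strictly descending distinct key list of p
theorem pv_keys_pairwise {α : Type} (k : α → Int) (p : List α) :
    (PySem.List.sorted (PySem.Set.ofList (p.map k)) (fun c => c) true).Pairwise (fun a b => b < a) := by
  have hnd : (PySem.List.sorted (PySem.Set.ofList (p.map k)) (fun c => c) true).Nodup :=
    ((PySem.List.sorted_perm _ _ _).nodup_iff).mpr (PySem.Set.nodup_ofList _)
  have hle := PySem.List.sorted_pairwise_rev (PySem.Set.ofList (p.map k)) (fun c => c)
  exact (hle.and hnd).imp (fun h => lt_of_le_of_ne h.1 (Ne.symm h.2))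

-- MAIN sorting lemma: the stable descending sort equals concatenation of the
-- original-order groups taken per distinct key in descending key order.
theorem pv_sortedRev_eq_groups {α : Type} (k : α → Int) (p : List α) :
    PySem.List.sorted p k true
      = (PySem.List.sorted (PySem.Set.ofList (p.map k)) (fun c => c) true).flatMap
          (fun c => p.filter (fun e => k e == c)) := by
  induction p using List.reverseRecOn with
  | nil => simp [(PySem.List.sorted_eq_nil_iff ([] : List α) k true).mpr rfl]
  | append_singleton q x ih =>
    have hofl : PySem.Set.ofList ((q ++ [x]).map k) = PySem.Set.add (PySem.Set.ofList (q.map k)) (k x) := by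
      simp [PySem.Set.ofList_eq_foldl, List.foldl_append]
    have hLHS : PySem.List.sorted (q ++ [x]) k true
        = PySem.List.insertBy (fun a b => decide (k b < k a)) x (PySem.List.sorted q k true) := by
      rw [PySem.List.sorted_rev_eq_foldl_insertBy, List.foldl_append,
        ← PySem.List.sorted_rev_eq_foldl_insertBy]
      simp
    have hfilter : ∀ c : Int, (q ++ [x]).filter (fun e => k e == c)
        = q.filter (fun e => k e == c) ++ if k x == c then [x] else [] := by
      intro c
      rw [List.filter_append]
      congr 1
      by_cases h : (k x == c) = true <;> simp [h]
    have hpw := pv_keys_pairwise k q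
    by_cases hmem : k x ∈ q.map k
    · have hc : (PySem.Set.ofList (q.map k)).contains (k x) = true :=
        (PySem.Set.contains_iff _ _).mpr ((PySem.Set.mem_ofList _ _).mpr hmem)
      have hadd : PySem.Set.add (PySem.Set.ofList (q.map k)) (k x) = PySem.Set.ofList (q.map k) :=
        pv_add_of_contains _ _ hc
      rw [hLHS, ih, hofl, hadd,
        pv_group_mem k x q _ hpw
          ((PySem.List.mem_sorted _ _ _ _).mpr ((PySem.Set.mem_ofList _ _).mpr hmem))]
      apply List.flatMap_congr
      intro c _
      exact (hfilter c).symm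
    · have hc : (PySem.Set.ofList (q.map k)).contains (k x) = false := by
        apply eq_false_of_ne_true
        intro h
        exact hmem ((PySem.Set.mem_ofList _ _).mp ((PySem.Set.contains_iff _ _).mp h))
      have hadd : PySem.Set.add (PySem.Set.ofList (q.map k)) (k x) = PySem.Set.ofList (q.map k) ++ [k x] :=
        pv_add_of_not_contains _ _ hc
      have hnotq : ∀ e ∈ q, (k e == k x) = false := by
        intro e he
        have : k e ≠ k x := fun h => hmem (h ▸ List.mem_map_of_mem he)
        simp [this]
      have hnotcs : k x ∉ PySem.List.sorted (PySem.Set.ofList (q.map k)) (fun c => c) true := by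
        intro h
        exact hmem ((PySem.Set.mem_ofList _ _).mp ((PySem.List.mem_sorted _ _ _ _).mp h))
      have hkeys : PySem.List.sorted (PySem.Set.ofList (q.map k) ++ [k x]) (fun c => c) true
          = PySem.List.insertBy (fun a b => decide (b < a)) (k x)
              (PySem.List.sorted (PySem.Set.ofList (q.map k)) (fun c => c) true) := by
        apply List.eq_of_perm_of_sorted (le := fun a b : Int => b < a)
        · intro a b _ _ h1 h2; exact absurd h2 (lt_asymm h1)
        · have hnd : (PySem.List.sorted (PySem.Set.ofList (q.map k) ++ [k x]) (fun c => c) true).Nodup := by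
            refine ((PySem.List.sorted_perm _ _ _).nodup_iff).mpr ?_
            simp only [List.nodup_append]
            refine ⟨PySem.Set.nodup_ofList _, List.nodup_singleton _, ?_⟩
            intro a ha b hb
            rw [List.mem_singleton] at hb
            subst hb
            intro h
            exact hmem ((PySem.Set.mem_ofList _ _).mp (h ▸ ha))
          have hle := PySem.List.sorted_pairwise_rev (PySem.Set.ofList (q.map k) ++ [k x]) (fun c => c)
          exact (hle.and hnd).imp (fun h => lt_of_le_of_ne h.1 (Ne.symm h.2))
        · refine pv_descInsert_pairwise (k x) _ hpw ?_
          intro y hy h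
          exact hnotcs (h ▸ hy)
        · refine (PySem.List.sorted_perm _ _ _).trans (List.Perm.trans ?_ (pv_insertBy_perm _ _ _).symm)
          exact (List.perm_append_singleton _ _).trans
            (List.Perm.cons _ (PySem.List.sorted_perm _ _ _).symm)
      rw [hLHS, ih, hofl, hadd, hkeys, pv_group_new k x q hnotq _ hpw hnotcs]
      apply List.flatMap_congr
      intro c _
      exact (hfilter c).symm

-- A's conditional set-building fold is the set of the filtered list
theorem pv_condAdd_eq (p : String → Bool) (kws : List String) :
    kws.foldl (fun m kw => if p kw then PySem.Set.add m kw else m) PySem.Set.empty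
      = PySem.Set.ofList (kws.filter p) := by
  rw [PySem.Set.ofList_eq_foldl]
  show kws.foldl _ ([] : List String) = _
  generalize ([] : List String) = s
  induction kws generalizing s with
  | nil => simp
  | cons kw kws ih =>
    by_cases h : p kw = true <;> simp [h, ih]

-- dedup-then-filter equals set-of-filtered (first-occurrence order commutes with filter)
theorem pv_ofList_filter (p : String → Bool) (kws : List String) :
    (PySem.Set.ofList kws).filter p = PySem.Set.ofList (kws.filter p) := by
  induction kws using List.reverseRecOn with
  | nil => simp [PySem.Set.ofList_eq_foldl]
  | append_singleton q x ih =>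
    have h2 : ∀ l : List String, PySem.Set.ofList (l ++ [x]) = PySem.Set.add (PySem.Set.ofList l) x := by
      intro l; simp [PySem.Set.ofList_eq_foldl, List.foldl_append]
    rw [h2 q]
    by_cases hp : p x = true
    · have hfs : List.filter p [x] = [x] := by simp [hp]
      by_cases hc : (PySem.Set.ofList q).contains x = true
      · have hx : x ∈ q := (PySem.Set.mem_ofList _ _).mp ((PySem.Set.contains_iff _ _).mp hc)
        have hcf : (PySem.Set.ofList (q.filter p)).contains x = true :=
          (PySem.Set.contains_iff _ _).mpr ((PySem.Set.mem_ofList _ _).mpr (List.mem_filter.mpr ⟨hx, hp⟩))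
        rw [pv_add_of_contains _ _ hc, List.filter_append, hfs, h2, pv_add_of_contains _ _ hcf, ih]
      · have hc' := eq_false_of_ne_true hc
        have hx : x ∉ q := fun h => hc ((PySem.Set.contains_iff _ _).mpr ((PySem.Set.mem_ofList _ _).mpr h))
        have hcf : (PySem.Set.ofList (q.filter p)).contains x = false := by
          apply eq_false_of_ne_true
          intro h
          exact hx (List.mem_filter.mp ((PySem.Set.mem_ofList _ _).mp ((PySem.Set.contains_iff _ _).mp h))).1
        rw [pv_add_of_not_contains _ _ hc', List.filter_append, List.filter_append, hfs, h2,
          pv_add_of_not_contains _ _ hcf, ih]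
    · have hp' : p x = false := eq_false_of_ne_true hp
      have hfs : List.filter p [x] = [] := by simp [hp']
      by_cases hc : (PySem.Set.ofList q).contains x = true
      · rw [pv_add_of_contains _ _ hc, List.filter_append, hfs, List.append_nil, ih]
      · rw [pv_add_of_not_contains _ _ (eq_false_of_ne_true hc), List.filter_append,
          List.filter_append, hfs, List.append_nil, List.append_nil, ih]

-- A's conditional-append fold over pools equals B's filterMap over pools
theorem pv_entries_eq (text : String) (L : List (String × List String)) :
    L.foldl (fun scores pk =>
      let matched : PySem.Set String :=
        pk.2.foldl (fun m kw => if PySem.Str.isIn kw text then PySem.Set.add m kw else m) PySem.Set.empty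
      if matched = [] then scores else scores ++ [(pk.1, (matched.length : Int), matched)]) []
    = L.filterMap (fun pk =>
      match (PySem.List.dedup pk.2).filter (fun kw => PySem.Str.isIn kw text) with
      | [] => none
      | hits => some (pk.1, (hits.length : Int), PySem.Set.ofList hits)) := by
  have hstep : ∀ (kws : List String),
      kws.foldl (fun m kw => if PySem.Str.isIn kw text then PySem.Set.add m kw else m) PySem.Set.empty
        = (PySem.List.dedup kws).filter (fun kw => PySem.Str.isIn kw text) := by
    intro kws
    rw [pv_condAdd_eq, show PySem.List.dedup kws = PySem.Set.ofList kws from rfl, pv_ofList_filter]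
  have hself : ∀ (kws : List String),
      PySem.Set.ofList ((PySem.List.dedup kws).filter (fun kw => PySem.Str.isIn kw text))
        = (PySem.List.dedup kws).filter (fun kw => PySem.Str.isIn kw text) := by
    intro kws
    exact PySem.Set.ofList_eq_self_of_nodup _ ((PySem.Set.nodup_ofList kws).filter _)
  have hfun : (fun (scores : List (String × Int × List String)) (pk : String × List String) =>
      let matched : PySem.Set String :=
        pk.2.foldl (fun m kw => if PySem.Str.isIn kw text then PySem.Set.add m kw else m) PySem.Set.empty
      if matched = [] then scores else scores ++ [(pk.1, (matched.length : Int), matched)])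
    = (fun scores pk =>
      match (PySem.List.dedup pk.2).filter (fun kw => PySem.Str.isIn kw text) with
      | [] => scores
      | hits => scores ++ [(pk.1, (hits.length : Int), PySem.Set.ofList hits)]) := by
    funext scores pk
    simp only [hstep]
    cases hcase : (PySem.List.dedup pk.2).filter (fun kw => PySem.Str.isIn kw text) with
    | nil => simp
    | cons a t =>
      simp only [← hcase, hself]
      rw [hcase]
      simp
  rw [hfun]
  suffices h : ∀ (acc : List (String × Int × List String)),
      L.foldl (fun scores pk =>
        match (PySem.List.dedup pk.2).filter (fun kw => PySem.Str.isIn kw text) with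
        | [] => scores
        | hits => scores ++ [(pk.1, (hits.length : Int), PySem.Set.ofList hits)]) acc
      = acc ++ L.filterMap (fun pk =>
        match (PySem.List.dedup pk.2).filter (fun kw => PySem.Str.isIn kw text) with
        | [] => none
        | hits => some (pk.1, (hits.length : Int), PySem.Set.ofList hits)) by
    simpa using h []
  induction L with
  | nil => intro acc; simp
  | cons pk L ih =>
    intro acc
    rw [List.foldl_cons, List.filterMap_cons]
    cases (PySem.List.dedup pk.2).filter (fun kw => PySem.Str.isIn kw text) with
    | nil => exact ih acc
    | cons a t => rw [ih]; simp

-- ===== VERDICT (by name: the statement is the Claim_ definition above) =====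
theorem score_ocr_for_pools_py_spec : Claim_equal_score_ocr_for_pools_py := by
  intro ocr_text pool_keywords _
  show score_ocr_for_pools_py ocr_text pool_keywords = score_ocr_for_pools_py_alt ocr_text pool_keywords
  simp only [score_ocr_for_pools_py, score_ocr_for_pools_py_alt]
  rw [pv_entries_eq (PySem.Str.lower ocr_text) (PySem.Dict.ofList pool_keywords).items]
  exact pv_sortedRev_eq_groups (fun e : String × Int × List String => e.2.1) _
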